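-- pv_equiv track=rewrite | github.com/mariolinoo/Dungeon-Crawler | dungeon_creater.py | dungeon_base
-- ===== SOURCE A (Python) =====
-- def dungeon_base(max_x, max_y):
--     dungeon= [["#" for x in range(max_x)] for y in range(max_y)]
--     for x in range(max_x):
--         for y in range(max_y):
--             if y == 0 or y == (max_y-1):
--                 dungeon[y][x]="\u2550" # ═ ; Erste und letzte Zeile
--             elif x == 0 or x == (max_x-1):
--                 dungeon[y][x] = "\u2551"  # ║  ; Erste und letzte Spalte
--     dungeon[0][0] = "\u2554" #Topleft
--     dungeon[0][max_x-1] = "\u2557" #Topright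
--     dungeon[max_y-1][0] = "\u255A" #Bottomleft
--     dungeon[max_y-1][max_x-1] = "\u255D" #Bottomright
--
--     return dungeon
-- ===== SOURCE B (Python) =====
-- def dungeon_base(max_x, max_y):
--     dungeon = []
--     for y in range(max_y):
--         if y == 0 or y == max_y - 1:
--             row = ["\u2550"] * max_x
--         else:
--             row = ["#"] * max_x
--             row[0] = "\u2551"
--             row[max_x - 1] = "\u2551"
--         dungeon.append(row)
--     dungeon[0][0] = "\u2554"
--     dungeon[0][max_x - 1] = "\u2557"
--     dungeon[max_y - 1][0] = "\u255A"
--     dungeon[max_y - 1][max_x - 1] = "\u255D"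
--     return dungeon
-- ===== Notes on version B (the rewrite author's own statement) =====
-- stated objective: simpler
-- what changed: B builds each row directly in one pass over y (full horizontal-border rows, or a '#' row patched at both ends) instead of A's x-by-y double loop with a per-cell 4-way conditional over a pre-built grid; the four corner assignments are kept verbatim.
import Mathlib
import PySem

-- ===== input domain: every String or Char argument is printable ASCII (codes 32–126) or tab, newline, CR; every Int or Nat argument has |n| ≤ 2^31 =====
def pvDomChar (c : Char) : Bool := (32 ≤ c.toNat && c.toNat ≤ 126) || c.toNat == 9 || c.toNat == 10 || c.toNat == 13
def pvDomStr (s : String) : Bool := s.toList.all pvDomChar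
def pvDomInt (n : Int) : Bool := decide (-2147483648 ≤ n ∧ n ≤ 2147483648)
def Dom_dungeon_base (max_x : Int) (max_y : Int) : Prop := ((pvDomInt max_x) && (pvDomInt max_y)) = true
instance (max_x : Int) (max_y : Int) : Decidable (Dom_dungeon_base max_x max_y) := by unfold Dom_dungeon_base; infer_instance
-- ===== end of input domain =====

-- B builds each bordered row directly in one pass over y instead of A's per-cell x-by-y double
-- loop over a pre-built grid (objective: simpler); the four corner assignments are kept verbatim.

-- ===== PORT A =====
-- Python `dungeon[y][x] = v` (row mutated in place); exact for 0 ≤ y < len(dungeon) and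
-- 0 ≤ x < len(row), which holds at every use admitted by Pre_dungeon_base.
def setCell (g : List (List String)) (y : Int) (x : Int) (v : String) : List (List String) :=
  g.set y.toNat ((g.getD y.toNat []).set x.toNat v)

def dungeon_base (max_x : Int) (max_y : Int) : List (List String) :=
  let d0 := (PySem.List.pyRange 0 max_y 1).map
              (fun _ => (PySem.List.pyRange 0 max_x 1).map (fun _ => "#"))
  let d1 := (PySem.List.pyRange 0 max_x 1).foldl (fun d x =>
      (PySem.List.pyRange 0 max_y 1).foldl (fun d y =>
        if y = 0 ∨ y = max_y - 1 then setCell d y x "═"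
        else if x = 0 ∨ x = max_x - 1 then setCell d y x "║"
        else d) d) d0
  setCell (setCell (setCell (setCell d1 0 0 "╔") 0 (max_x - 1) "╗") (max_y - 1) 0 "╚")
    (max_y - 1) (max_x - 1) "╝"

-- ===== PORT B =====
def dungeon_base_alt (max_x : Int) (max_y : Int) : List (List String) :=
  let d := (PySem.List.pyRange 0 max_y 1).foldl (fun d y =>
      if y = 0 ∨ y = max_y - 1 then d ++ [List.replicate max_x.toNat "═"]
      else d ++ [((List.replicate max_x.toNat "#").set 0 "║").set (max_x - 1).toNat "║"]) []
  setCell (setCell (setCell (setCell d 0 0 "╔") 0 (max_x - 1) "╗") (max_y - 1) 0 "╚")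
    (max_y - 1) (max_x - 1) "╝"

-- ===== PRECONDITION & SPEC =====
-- A raises IndexError (empty grid / empty rows) whenever max_x < 1 or max_y < 1.
def Pre_dungeon_base (max_x : Int) (max_y : Int) : Prop := 1 ≤ max_x ∧ 1 ≤ max_y
instance (max_x : Int) (max_y : Int) : Decidable (Pre_dungeon_base max_x max_y) := by
  unfold Pre_dungeon_base; infer_instance
def pvWitness_dungeon_base : Int × Int := (3, 4)

def Spec_dungeon_base (max_x : Int) (max_y : Int) (out : List (List String)) : Prop :=
  out = dungeon_base_alt max_x max_y
instance (max_x : Int) (max_y : Int) (out : List (List String)) :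
    Decidable (Spec_dungeon_base max_x max_y out) := by unfold Spec_dungeon_base; infer_instance

-- ===== CLAIM (what is proved, stated in full; the proofs are below) =====
def Claim_equal_dungeon_base : Prop := ∀ (max_x : Int) (max_y : Int),
  Dom_dungeon_base max_x max_y → Pre_dungeon_base max_x max_y →
  Spec_dungeon_base max_x max_y (dungeon_base max_x max_y)

-- ===== LEMMAS AND PROOFS =====

/-- Generic "set index i according to F" fold step. -/
def genStep {α : Type} (F : Nat → α → Option α) (dflt : α) (l : List α) (i : Nat) : List α :=
  match F i (l.getD i dflt) with
  | some v => l.set i v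
  | none => l

lemma genStep_length {α : Type} (F : Nat → α → Option α) (dflt : α) :
    ∀ (ys : List Nat) (l : List α), (ys.foldl (genStep F dflt) l).length = l.length := by
  intro ys
  induction ys with
  | nil => intro l; rfl
  | cons y ys ih =>
      intro l
      simp only [List.foldl_cons, ih]
      unfold genStep
      cases F y (l.getD y dflt) <;> simp

lemma genStep_get {α : Type} (F : Nat → α → Option α) (dflt : α) :
    ∀ (n : Nat) (l : List α), n ≤ l.length → ∀ (k : Nat),
      ((List.range n).foldl (genStep F dflt) l)[k]?
        = if k < n then
            match l[k]? with
            | some r => some ((F k r).getD r)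
            | none => none
          else l[k]? := by
  intro n
  induction n with
  | zero => intro l _ k; simp
  | succ n ih =>
      intro l hn k
      have hn' : n ≤ l.length := by omega
      have hnl : n < l.length := by omega
      rw [List.range_succ, List.foldl_append, List.foldl_cons, List.foldl_nil]
      set R := (List.range n).foldl (genStep F dflt) l with hR
      have hRlen : R.length = l.length := genStep_length F dflt _ l
      have hRn : R[n]? = l[n]? := by rw [ih l hn' n]; simp
      have hln : l[n]? = some (l[n]'hnl) := List.getElem?_eq_getElem hnl
      have hRD : R.getD n dflt = (l[n]'hnl) := by
        rw [List.getD_eq_getElem?_getD, hRn, hln]; rfl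
      unfold genStep
      rw [hRD]
      by_cases hk : k = n
      · simp only [hk]
        cases hF : F n (l[n]'hnl) with
        | some v =>
            rw [List.getElem?_set_self (by omega)]
            simp [hln, hF]
        | none =>
            rw [hRn, hln]
            simp [hF]
      · have hsplit : (k < n + 1) ↔ (k < n) := by omega
        cases hF : F n (l[n]'hnl) with
        | some v =>
            rw [List.getElem?_set_ne (by omega)]
            rw [ih l hn' k]
            simp only [hsplit]
        | none =>
            rw [ih l hn' k]
            simp only [hsplit]

/-- The per-cell update A performs at row `j`, column `x` (none = cell untouched). -/
def innF (max_x max_y : Int) (x : Int) (j : Nat) (r : List String) : Option (List String) :=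
  if (j : Int) = 0 ∨ (j : Int) = max_y - 1 then some (r.set x.toNat "═")
  else if x = 0 ∨ x = max_x - 1 then some (r.set x.toNat "║")
  else none

lemma innerA_eq (max_x max_y x : Int) :
    (fun (d : List (List String)) (y : Nat) =>
      if (y : Int) = 0 ∨ (y : Int) = max_y - 1 then setCell d (y : Int) x "═"
      else if x = 0 ∨ x = max_x - 1 then setCell d (y : Int) x "║" else d)
    = genStep (innF max_x max_y x) [] := by
  funext d y
  unfold genStep innF setCell
  split_ifs <;> simp

lemma outerA_get (max_x max_y : Int) (my : Nat) :
    ∀ (xs : List Nat) (d : List (List String)), d.length = my → ∀ (j : Nat),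
      (xs.foldl (fun d (x : Nat) =>
        (List.range my).foldl (genStep (innF max_x max_y (x : Int)) []) d) d)[j]?
      = (d[j]?).map
          (fun r => xs.foldl (fun r (x : Nat) => (innF max_x max_y (x : Int) j r).getD r) r) := by
  intro xs
  induction xs with
  | nil =>
      intro d _ j
      simp
  | cons x xs ih =>
      intro d hd j
      simp only [List.foldl_cons]
      set d' := (List.range my).foldl (genStep (innF max_x max_y (x : Int)) []) d with hd'
      have hlen : d'.length = my := by rw [hd', genStep_length]; exact hd
      rw [ih d' hlen j]
      have hget : d'[j]? = (d[j]?).map (fun r => (innF max_x max_y (x : Int) j r).getD r) := by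
        rw [hd', genStep_get (innF max_x max_y (x : Int)) [] my d (le_of_eq hd.symm) j]
        by_cases hj : j < my
        · simp only [hj, if_pos]
          cases d[j]? <;> simp
        · have : d[j]? = none := by
            rw [List.getElem?_eq_none_iff]; omega
          simp [hj, this]
      rw [hget]
      cases d[j]? <;> simp

lemma row_edge (max_x max_y : Int) (j mx : Nat)
    (hy : (j : Int) = 0 ∨ (j : Int) = max_y - 1) :
    (List.range mx).foldl (fun r (x : Nat) => (innF max_x max_y (x : Int) j r).getD r)
      (List.replicate mx "#")
    = List.replicate mx "═" := by
  have hstep : (fun (r : List String) (x : Nat) => (innF max_x max_y (x : Int) j r).getD r)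
      = genStep (fun (_ : Nat) (_ : String) => some "═") "" := by
    funext r x
    unfold genStep innF
    rw [if_pos hy]
    simp
  rw [hstep]
  apply List.ext_getElem?
  intro k
  rw [genStep_get _ "" mx (List.replicate mx "#") (by simp) k]
  by_cases hk : k < mx
  · simp [hk]
  · have h1 : (List.replicate mx "#")[k]? = none := by
      rw [List.getElem?_eq_none_iff]; simp; omega
    have h2 : (List.replicate mx "═")[k]? = none := by
      rw [List.getElem?_eq_none_iff]; simp; omega
    simp [hk]

lemma row_int (max_x max_y : Int) (j mx : Nat)
    (hy : ¬((j : Int) = 0 ∨ (j : Int) = max_y - 1))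
    (hmx : max_x = (mx : Int)) (h1 : 1 ≤ mx) :
    (List.range mx).foldl (fun r (x : Nat) => (innF max_x max_y (x : Int) j r).getD r)
      (List.replicate mx "#")
    = ((List.replicate mx "#").set 0 "║").set (mx - 1) "║" := by
  have hstep : (fun (r : List String) (x : Nat) => (innF max_x max_y (x : Int) j r).getD r)
      = genStep (fun (x : Nat) (_ : String) =>
          if (x : Int) = 0 ∨ (x : Int) = max_x - 1 then some "║" else none) "" := by
    funext r x
    unfold genStep innF
    rw [if_neg hy]
    by_cases hxc : x = 0 ∨ (x : Int) = max_x - 1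
    · have t1 := eq_true hxc
      simp [t1]
    · have t1 := eq_false hxc
      simp [t1]
  rw [hstep]
  apply List.ext_getElem?
  intro k
  rw [genStep_get _ "" mx (List.replicate mx "#") (by simp) k]
  by_cases hk : k < mx
  · have hrep : (List.replicate mx "#")[k]? = some "#" := by
      simp [hk]
    have hcond : (k = 0 ∨ (k : Int) = max_x - 1) ↔ (k = 0 ∨ k = mx - 1) := by
      subst hmx; omega
    have hrhs : (((List.replicate mx "#").set 0 "║").set (mx - 1) "║")[k]?
        = some (if k = 0 ∨ k = mx - 1 then "║" else "#") := by
      by_cases hlast : k = mx - 1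
      · subst hlast
        rw [List.getElem?_set_self (by simp; omega)]
        simp
      · rw [List.getElem?_set_ne (by omega)]
        by_cases h0 : k = 0
        · subst h0
          rw [List.getElem?_set_self (by simp; omega)]
          simp [hlast]
        · rw [List.getElem?_set_ne (by omega)]
          simp [hk, h0, hlast]
    rw [hrhs, if_pos hk, hrep]
    by_cases hc : k = 0 ∨ (k : Int) = max_x - 1
    · have t1 := eq_true hc
      have t2 := eq_true (hcond.mp hc)
      simp [t1, t2]
    · have t1 := eq_false hc
      have t2 := eq_false (fun h => hc (hcond.mpr h))
      simp [t1, t2]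
  · have h1' : (List.replicate mx "#")[k]? = none := by
      rw [List.getElem?_eq_none_iff]; simp; omega
    have h2 : (((List.replicate mx "#").set 0 "║").set (mx - 1) "║")[k]? = none := by
      rw [List.getElem?_eq_none_iff]; simp; omega
    simp [hk]

lemma foldl_append_map {α β : Type} (f : α → β) :
    ∀ (l : List α) (init : List β),
      l.foldl (fun acc a => acc ++ [f a]) init = init ++ l.map f := by
  intro l
  induction l with
  | nil => intro init; simp
  | cons a l ih => intro init; simp [ih]

/-- The two pre-corner grids coincide. -/
lemma core_eq (max_x max_y : Int) (hx : 1 ≤ max_x) (hy : 1 ≤ max_y) :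
    ((PySem.List.pyRange 0 max_x 1).foldl (fun d x =>
      (PySem.List.pyRange 0 max_y 1).foldl (fun d y =>
        if y = 0 ∨ y = max_y - 1 then setCell d y x "═"
        else if x = 0 ∨ x = max_x - 1 then setCell d y x "║"
        else d) d)
      ((PySem.List.pyRange 0 max_y 1).map
        (fun _ => (PySem.List.pyRange 0 max_x 1).map (fun _ => "#"))))
    = (PySem.List.pyRange 0 max_y 1).foldl (fun d y =>
        if y = 0 ∨ y = max_y - 1 then d ++ [List.replicate max_x.toNat "═"]
        else d ++ [((List.replicate max_x.toNat "#").set 0 "║").set (max_x - 1).toNat "║"]) [] := by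
  obtain ⟨mx, hmx⟩ : ∃ mx : Nat, max_x = (mx : Int) := ⟨max_x.toNat, (Int.toNat_of_nonneg (by omega)).symm⟩
  obtain ⟨my, hmy⟩ : ∃ my : Nat, max_y = (my : Int) := ⟨max_y.toNat, (Int.toNat_of_nonneg (by omega)).symm⟩
  have hmx1 : 1 ≤ mx := by omega
  have hmy1 : 1 ≤ my := by omega
  subst hmx; subst hmy
  rw [PySem.List.pyRange_zero_natCast mx, PySem.List.pyRange_zero_natCast my]
  -- initial grid is my rows of (replicate mx "#")
  have hd0 : (List.map (fun (k : Nat) => (k : Int)) (List.range my)).map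
      (fun _ => (List.map (fun (k : Nat) => (k : Int)) (List.range mx)).map (fun _ => "#"))
      = List.replicate my (List.replicate mx "#") := by
    rw [List.map_const', List.map_const']
    simp
  rw [hd0]
  simp only [List.foldl_map]
  -- A side: rewrite the inner folds into genStep form
  have hA : (fun (d : List (List String)) (x : Nat) =>
      (List.range my).foldl (fun (d : List (List String)) (y : Nat) =>
        if (y : Int) = 0 ∨ (y : Int) = (my : Int) - 1 then setCell d (y : Int) (x : Int) "═"
        else if (x : Int) = 0 ∨ (x : Int) = (mx : Int) - 1 then setCell d (y : Int) (x : Int) "║"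
        else d) d)
      = (fun (d : List (List String)) (x : Nat) =>
        (List.range my).foldl (genStep (innF (mx : Int) (my : Int) (x : Int)) []) d) := by
    funext d x
    rw [innerA_eq (mx : Int) (my : Int) (x : Int)]
  rw [hA]
  -- B side: one map
  have hB : (fun (d : List (List String)) (y : Nat) =>
      if (y : Int) = 0 ∨ (y : Int) = (my : Int) - 1 then d ++ [List.replicate ((mx : Int)).toNat "═"]
      else d ++ [((List.replicate ((mx : Int)).toNat "#").set 0 "║").set ((mx : Int) - 1).toNat "║"])
      = (fun (d : List (List String)) (y : Nat) =>
        d ++ [if (y : Int) = 0 ∨ (y : Int) = (my : Int) - 1 then List.replicate mx "═"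
              else ((List.replicate mx "#").set 0 "║").set (mx - 1) "║"]) := by
    funext d y
    have ht : ((mx : Int)).toNat = mx := by simp
    have ht2 : ((mx : Int) - 1).toNat = mx - 1 := by omega
    rw [ht, ht2]
    split_ifs <;> rfl
  rw [hB, foldl_append_map
    (fun (y : Nat) => if (y : Int) = 0 ∨ (y : Int) = (my : Int) - 1 then List.replicate mx "═"
      else ((List.replicate mx "#").set 0 "║").set (mx - 1) "║") (List.range my) []]
  apply List.ext_getElem?
  intro j
  rw [outerA_get (mx : Int) (my : Int) my (List.range mx)
        (List.replicate my (List.replicate mx "#")) (by simp) j]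
  by_cases hj : j < my
  · have hrep : (List.replicate my (List.replicate mx "#"))[j]? = some (List.replicate mx "#") := by
      simp [hj]
    rw [hrep]
    have hmapj : ((List.range my).map (fun (y : Nat) =>
        if (y : Int) = 0 ∨ (y : Int) = (my : Int) - 1 then List.replicate mx "═"
        else ((List.replicate mx "#").set 0 "║").set (mx - 1) "║"))[j]?
        = some (if (j : Int) = 0 ∨ (j : Int) = (my : Int) - 1 then List.replicate mx "═"
        else ((List.replicate mx "#").set 0 "║").set (mx - 1) "║") := by
      rw [List.getElem?_map]
      simp [hj]
    rw [List.nil_append, hmapj]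
    simp only [Option.map_some]
    by_cases hyc : j = 0 ∨ (j : Int) = (my : Int) - 1
    · rw [row_edge (mx : Int) (my : Int) j mx (by omega)]
      have t := eq_true hyc
      simp [t]
    · rw [row_int (mx : Int) (my : Int) j mx (by omega) rfl hmx1]
      have t := eq_false hyc
      simp [t]
  · have h1 : (List.replicate my (List.replicate mx "#"))[j]? = none := by
      rw [List.getElem?_eq_none_iff]; simp; omega
    have h2 : ([] ++ (List.range my).map (fun (y : Nat) =>
        if (y : Int) = 0 ∨ (y : Int) = (my : Int) - 1 then List.replicate mx "═"
        else ((List.replicate mx "#").set 0 "║").set (mx - 1) "║"))[j]? = none := by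
      rw [List.getElem?_eq_none_iff]; simp; omega
    rw [h1, h2]
    rfl

-- ===== VERDICT (by name: the statement is the Claim_ definition above) =====
theorem dungeon_base_spec : Claim_equal_dungeon_base := by
  intro max_x max_y _ hpre
  obtain ⟨hx, hy⟩ := hpre
  unfold Spec_dungeon_base dungeon_base dungeon_base_alt
  dsimp only
  rw [core_eq max_x max_y hx hy]
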